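-- pv_equiv track=rewrite | github.com/xFrah/HWs | HW8-req/program01.py | startCross
-- ===== SOURCE A (Python) =====
-- def cross(colors, i, D, shouldI):
--     return [e + [color] for e in cross(colors, i - 1, D, shouldI) for color in colors if
--             color != (e[-1] if e else [])] if i else [[]]
--
-- def startCross(colors, D):
--     shouldI = 1 if D % 2 else 0
--     lista = []
--     for current in cross(colors, 2, D, shouldI):
--         (whole := [tuple((current * (D // 2)) + ([current[0]] * shouldI))] * D)[1::2] = [tuple(
--             (current[::-1] * (D // 2)) + ([current[1]] * shouldI))] * (D // 2)
--         lista.append(whole)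
--     return [tuple(x) for x in lista]
-- ===== SOURCE B (Python) =====
-- def startCross(colors, D):
--     half, odd = D // 2, D % 2
--     def grid(c1, c2):
--         even_row = tuple([c1, c2] * half + [c1] * odd)
--         odd_row = tuple([c2, c1] * half + [c2] * odd)
--         return tuple(even_row if i % 2 == 0 else odd_row for i in range(D))
--     return [grid(c1, c2) for c1 in colors for c2 in colors if c2 != c1]
-- ===== Notes on version B (the rewrite author's own statement) =====
-- stated objective: simpler
-- what changed: Replaces the recursive cross() pair generator and the build-then-overwrite slice assignment whole[1::2]=... with two plain nested loops over colors (filtering c2 != c1 by value) and a direct row selection even/odd over range(D).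
import Mathlib
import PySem

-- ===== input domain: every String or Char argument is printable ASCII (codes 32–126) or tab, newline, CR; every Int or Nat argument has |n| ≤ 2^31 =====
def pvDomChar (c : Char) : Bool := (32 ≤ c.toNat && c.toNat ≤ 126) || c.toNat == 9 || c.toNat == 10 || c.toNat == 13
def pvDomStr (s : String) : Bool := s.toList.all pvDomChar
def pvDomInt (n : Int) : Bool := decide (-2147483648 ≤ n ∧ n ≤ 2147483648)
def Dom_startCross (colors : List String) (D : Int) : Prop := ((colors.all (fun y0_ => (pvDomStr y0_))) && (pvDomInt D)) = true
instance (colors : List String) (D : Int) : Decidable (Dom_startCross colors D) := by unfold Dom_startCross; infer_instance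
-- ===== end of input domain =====

-- B replaces the recursive pair generator and the slice-overwrite grid construction with
-- plain nested loops and direct even/odd row selection (objective: simpler).

-- ===== PORT A =====

-- Python 'lst * k' (list repetition; k < 0 behaves like 0) — exact
def pyListMul {α : Type} (xs : List α) (k : Int) : List α :=
  (List.replicate k.toNat xs).flatten

-- A's cross(colors, i, D, shouldI): recursion on i; only ever called with i = 2,
-- so the truthiness test 'if i' is ported as Nat recursion (exact for i ≥ 0).
-- 'color != (e[-1] if e else [])' : a string never equals a list, so for e = [] it is True.
def crossA (colors : List String) (i : Nat) : List (List String) :=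
  match i with
  | 0 => [[]]
  | n + 1 =>
      (crossA colors n).flatMap (fun e =>
        (colors.filter (fun color =>
          match e.getLast? with
          | none => true
          | some l => color != l)).map (fun color => e ++ [color]))

-- Python's extended-slice assignment whole[1::2] = ys (lengths always match here: exact
-- transcription of replacing the elements at indices 1,3,5,…)
def assignOddIdx {α : Type} : List α → List α → List α
  | [], _ => []
  | [a], _ => [a]
  | a :: _ :: rest, y :: ys => a :: y :: assignOddIdx rest ys
  | a :: b :: rest, [] => a :: b :: assignOddIdx rest []

def startCross (colors : List String) (D : Int) : List (List (List String)) :=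
  let shouldI : Int := if PySem.Int.mod D 2 ≠ 0 then 1 else 0
  (crossA colors 2).foldl (fun lista current =>
    -- current[0]/current[1]: every element of crossA colors 2 has length 2, so the
    -- default "" of pyGet? is unreachable (Python would raise IndexError there)
    let c0 := (PySem.List.pyGet? current 0).getD ""
    let c1 := (PySem.List.pyGet? current 1).getD ""
    let evenRow := pyListMul current (PySem.Int.floordiv D 2) ++ pyListMul [c0] shouldI
    let oddRow := pyListMul current.reverse (PySem.Int.floordiv D 2) ++ pyListMul [c1] shouldI
    let whole := assignOddIdx (List.replicate D.toNat evenRow)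
                   (List.replicate (PySem.Int.floordiv D 2).toNat oddRow)
    lista ++ [whole]) []

-- ===== PORT B =====
def startCross_alt (colors : List String) (D : Int) : List (List (List String)) :=
  let half := PySem.Int.floordiv D 2
  let odd := PySem.Int.mod D 2
  let grid := fun (c1 c2 : String) =>
    let evenRow := pyListMul [c1, c2] half ++ pyListMul [c1] odd
    let oddRow := pyListMul [c2, c1] half ++ pyListMul [c2] odd
    (PySem.List.pyRange 0 D 1).map (fun i => if PySem.Int.mod i 2 == 0 then evenRow else oddRow)
  colors.flatMap (fun c1 => (colors.filter (fun c2 => c2 != c1)).map (fun c2 => grid c1 c2))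

-- ===== PRECONDITION & SPEC =====
def Spec_startCross (colors : List String) (D : Int) (out : List (List (List String))) : Prop := out = startCross_alt colors D
instance (colors : List String) (D : Int) (out : List (List (List String))) : Decidable (Spec_startCross colors D out) := by unfold Spec_startCross; infer_instance

-- ===== CLAIM (what is proved, stated in full; the proofs are below) =====
def Claim_equal_startCross : Prop := ∀ (colors : List String) (D : Int), Dom_startCross colors D → Spec_startCross colors D (startCross colors D)

-- ===== LEMMAS AND PROOFS =====

lemma crossA_two (colors : List String) :
    crossA colors 2 =
      colors.flatMap (fun c1 => (colors.filter (fun c2 => c2 != c1)).map (fun c2 => [c1, c2])) := by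
  show crossA colors (0 + 1 + 1) = _
  simp [crossA, List.getLast?, List.flatMap_map]

lemma assignOdd_replicate {α : Type} (x y : α) : ∀ (n : Nat),
    assignOddIdx (List.replicate n x) (List.replicate (n / 2) y) =
      (List.range n).map (fun i => if i % 2 == 0 then x else y)
  | 0 => rfl
  | 1 => rfl
  | (n+2) => by
    have ih := assignOdd_replicate x y n
    have h2 : (n + 2) / 2 = n / 2 + 1 := by omega
    rw [h2]
    have hrep : List.replicate (n + 2) x = x :: x :: List.replicate n x := rfl
    have hrep2 : List.replicate (n / 2 + 1) y = y :: List.replicate (n / 2) y := rfl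
    rw [hrep, hrep2]
    show x :: y :: assignOddIdx (List.replicate n x) (List.replicate (n / 2) y) = _
    rw [ih]
    have hr : List.range (n + 2) = 0 :: 1 :: (List.range n).map (fun i => i + 2) := by
      simp [List.range_succ_eq_map, List.map_map]
    rw [hr]
    simp [List.map_map, Function.comp]

lemma whole_eq (D : Int) (c1 c2 : String) :
    assignOddIdx (List.replicate D.toNat
        (pyListMul [c1,c2] (PySem.Int.floordiv D 2) ++ pyListMul [c1] (if PySem.Int.mod D 2 ≠ 0 then 1 else 0)))
      (List.replicate (PySem.Int.floordiv D 2).toNat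
        (pyListMul [c2,c1] (PySem.Int.floordiv D 2) ++ pyListMul [c2] (if PySem.Int.mod D 2 ≠ 0 then 1 else 0)))
    = (PySem.List.pyRange 0 D 1).map (fun i =>
        if PySem.Int.mod i 2 == 0
        then pyListMul [c1,c2] (PySem.Int.floordiv D 2) ++ pyListMul [c1] (PySem.Int.mod D 2)
        else pyListMul [c2,c1] (PySem.Int.floordiv D 2) ++ pyListMul [c2] (PySem.Int.mod D 2)) := by
  have hqr := PySem.Int.floordiv_mul_add_mod D 2
  have hmod : PySem.Int.mod D 2 = 0 ∨ PySem.Int.mod D 2 = 1 := by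
    rw [PySem.Int.mod_eq_emod_of_pos (by norm_num)]; omega
  have hif : (if PySem.Int.mod D 2 ≠ 0 then (1:Int) else 0) = PySem.Int.mod D 2 := by
    rcases hmod with h|h <;> rw [h] <;> norm_num
  rw [hif]
  have htn : (PySem.Int.floordiv D 2).toNat = D.toNat / 2 := by
    rcases hmod with h|h <;> omega
  rw [htn, assignOdd_replicate, PySem.List.pyRange_one]
  rw [List.map_map]
  simp only [sub_zero]
  refine List.map_congr_left (fun k _ => ?_)
  simp only [Function.comp_apply, zero_add]
  have hm : PySem.Int.mod (k:Int) 2 = ((k % 2 : Nat) : Int) := by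
    rw [PySem.Int.mod_eq_emod_of_pos (by norm_num)]; omega
  have hb : (PySem.Int.mod (k:Int) 2 == 0) = (k % 2 == 0) := by
    rw [hm]; rcases Nat.mod_two_eq_zero_or_one k with h|h <;> rw [h] <;> norm_num
  rw [hb]

-- ===== VERDICT (by name: the statement is the Claim_ definition above) =====
theorem startCross_spec : Claim_equal_startCross := by
  intro colors D _
  unfold Spec_startCross startCross startCross_alt
  rw [crossA_two, PySem.List.foldl_append_singleton_eq_map, List.nil_append, List.map_flatMap]
  refine List.flatMap_congr (fun c1 hc1 => ?_)
  rw [List.map_map]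
  refine List.map_congr_left (fun c2 hc2 => ?_)
  exact whole_eq D c1 c2
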